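-- pv_equiv track=rewrite | github.com/shixuev5/patent | agents/ai_search/src/subagents/close_reader/passages.py | collect_key_terms
-- ===== SOURCE A (Python) =====
-- from typing import Any, Dict, List
--
-- def collect_key_terms(search_elements: Dict[str, Any]) -> List[str]:
--     terms: List[str] = []
--     for element in search_elements.get("search_elements") or []:
--         if not isinstance(element, dict):
--             continue
--         for key in ("keywords_zh", "keywords_en"):
--             for value in element.get(key) or []:
--                 text = str(value or "").strip()
--                 if text and text not in terms:
--                     terms.append(text)
--     return terms[:24]
-- ===== SOURCE B (Python) =====
-- def collect_key_terms(search_elements):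
--     # Phase 1: flatten each element's two keyword lists (concatenated) into one
--     # flat candidate list of stripped, non-empty strings — no uniqueness check.
--     candidates = [
--         text
--         for element in (search_elements.get("search_elements") or [])
--         if isinstance(element, dict)
--         for value in (element.get("keywords_zh") or []) + (element.get("keywords_en") or [])
--         if (text := str(value or "").strip())
--     ]
--     # Phase 2: classic 'nub' — keep the head, filter its duplicates out of the
--     # remainder, repeat; no membership test against the output is ever made.
--     result = []
--     while candidates:
--         head = candidates[0]
--         result.append(head)
--         candidates = [x for x in candidates[1:] if x != head]
--     return result[:24]
-- ===== Notes on version B (the rewrite author's own statement) =====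
-- stated objective: alternative
-- what changed: A's single pass that checks each stripped string against the growing output list is replaced by a dedup-free flat gather over the two concatenated keyword lists per element, followed by a classic 'nub' that repeatedly keeps the head and filters its duplicates out of the remainder; no membership test against the output is ever made.
import Mathlib
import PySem

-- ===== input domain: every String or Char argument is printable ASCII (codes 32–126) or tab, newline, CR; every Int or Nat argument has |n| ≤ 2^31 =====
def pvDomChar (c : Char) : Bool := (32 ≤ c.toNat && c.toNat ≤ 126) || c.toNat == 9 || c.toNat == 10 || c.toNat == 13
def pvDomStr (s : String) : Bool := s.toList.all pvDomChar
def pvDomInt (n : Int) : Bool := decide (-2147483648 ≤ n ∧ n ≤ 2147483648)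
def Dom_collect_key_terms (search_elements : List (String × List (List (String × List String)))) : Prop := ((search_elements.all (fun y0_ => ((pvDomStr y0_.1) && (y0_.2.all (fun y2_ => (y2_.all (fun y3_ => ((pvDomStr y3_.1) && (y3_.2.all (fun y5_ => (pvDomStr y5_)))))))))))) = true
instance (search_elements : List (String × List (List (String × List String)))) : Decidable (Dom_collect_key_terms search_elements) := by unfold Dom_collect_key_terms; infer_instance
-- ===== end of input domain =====

-- B replaces A's membership-checked single pass by a dedup-free flat gather plus a
-- head-keep/tail-filter 'nub'; same return value, no side effects.

-- ===== PORT A =====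
-- body of A's innermost loop: text = str(value or '').strip(); append if non-empty and new
def aValueStep (terms : List String) (value : String) : List String :=
  let text := PySem.Str.strip value
  if text ≠ "" ∧ text ∉ terms then terms ++ [text] else terms

-- body of A's outer loop over one element (a dict); the 'isinstance' guard never fires here
def aElemStep (terms : List String) (element : List (String × List String)) : List String :=
  ["keywords_zh", "keywords_en"].foldl
    (fun terms key => ((PySem.Dict.mk element).getD key []).foldl aValueStep terms) terms

def collect_key_terms (search_elements : List (String × List (List (String × List String)))) : List String :=
  let terms : List String :=
    ((PySem.Dict.mk search_elements).getD "search_elements" []).foldl aElemStep []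
  PySem.List.slice terms none (some 24)

-- ===== PORT B =====
-- the walrus filter of B's gather comprehension: the stripped text if truthy, else nothing
def bCand (value : String) : Option String :=
  let text := PySem.Str.strip value
  if text = "" then none else some text

-- B's while loop: append the head to result, filter its duplicates out of the remainder
def bNubLoop (result : List String) : List String → List String
  | [] => result
  | head :: rest => bNubLoop (result ++ [head]) (rest.filter (fun x => x ≠ head))
termination_by items => items.length
decreasing_by exact Nat.lt_succ_of_le (by simpa using List.length_filter_le _ rest.attach)

def collect_key_terms_alt (search_elements : List (String × List (List (String × List String)))) : List String :=
  let candidates : List String :=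
    ((PySem.Dict.mk search_elements).getD "search_elements" []).flatMap (fun element =>
      (((PySem.Dict.mk element).getD "keywords_zh" []) ++
       ((PySem.Dict.mk element).getD "keywords_en" [])).filterMap bCand)
  (bNubLoop [] candidates).take 24

-- ===== PRECONDITION & SPEC =====
def Spec_collect_key_terms (search_elements : List (String × List (List (String × List String)))) (out : List String) : Prop := out = collect_key_terms_alt search_elements
instance (search_elements : List (String × List (List (String × List String)))) (out : List String) : Decidable (Spec_collect_key_terms search_elements out) := by unfold Spec_collect_key_terms; infer_instance

-- ===== CLAIM =====
def Claim_equal_collect_key_terms : Prop := ∀ (search_elements : List (String × List (List (String × List String)))), Dom_collect_key_terms search_elements → Spec_collect_key_terms search_elements (collect_key_terms search_elements)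

-- ===== LEMMAS AND PROOFS =====

theorem aValueStep_eq_add (acc : List String) (v : String) (h : PySem.Str.strip v ≠ "") :
    aValueStep acc v = PySem.Set.add acc (PySem.Str.strip v) := by
  simp only [aValueStep, PySem.Set.add]
  by_cases hm : PySem.Str.strip v ∈ acc <;> simp [hm, h]

theorem aValueStep_eq_self (acc : List String) (v : String) (h : PySem.Str.strip v = "") :
    aValueStep acc v = acc := by
  simp [aValueStep, h]

-- A's innermost loop = folding Set.add over that list's stripped non-empty candidates.
theorem inner_fold_eq (vs : List String) (acc : List String) :
    vs.foldl aValueStep acc = (vs.filterMap bCand).foldl PySem.Set.add acc := by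
  induction vs generalizing acc with
  | nil => rfl
  | cons v vs ih =>
      rw [List.foldl_cons, List.filterMap_cons]
      by_cases h : PySem.Str.strip v = ""
      · rw [show bCand v = none by simp [bCand, h], aValueStep_eq_self acc v h, ih]
      · rw [show bCand v = some (PySem.Str.strip v) by simp [bCand, h],
          aValueStep_eq_add acc v h, List.foldl_cons, ih]

-- one element's contribution (the two key lists concatenated, as B gathers them)
theorem elem_step_eq (e : List (String × List String)) (acc : List String) :
    aElemStep acc e
    = ((((PySem.Dict.mk e).getD "keywords_zh" []) ++
        ((PySem.Dict.mk e).getD "keywords_en" [])).filterMap bCand).foldl PySem.Set.add acc := by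
  simp only [aElemStep, List.foldl_cons, List.foldl_nil, List.filterMap_append,
    List.foldl_append, inner_fold_eq]

-- A's whole nested loop = folding Set.add over B's flat candidate list.
theorem outer_fold_eq (els : List (List (String × List String))) (acc : List String) :
    els.foldl aElemStep acc
    = (els.flatMap (fun element =>
        (((PySem.Dict.mk element).getD "keywords_zh" []) ++
         ((PySem.Dict.mk element).getD "keywords_en" [])).filterMap bCand)).foldl PySem.Set.add acc := by
  induction els generalizing acc with
  | nil => rfl
  | cons e es ih =>
      rw [List.foldl_cons, ih, List.flatMap_cons, List.foldl_append, elem_step_eq]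

-- skipping already-seen elements: filtering out a member of acc changes nothing
theorem foldl_add_filter (t : List String) (acc : List String) (x : String) (hx : x ∈ acc) :
    t.foldl PySem.Set.add acc = (t.filter (fun y => y ≠ x)).foldl PySem.Set.add acc := by
  induction t generalizing acc with
  | nil => rfl
  | cons h t ih =>
      by_cases hhx : h = x
      · subst hhx
        rw [List.foldl_cons, show PySem.Set.add acc h = acc by simp [PySem.Set.add, hx]]
        simpa using ih acc hx
      · rw [List.foldl_cons, List.filter_cons_of_pos (by simpa using hhx), List.foldl_cons]
        exact ih _ (by simp [PySem.Set.add]; split <;> simp [hx])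

-- an element absent from the list can be pulled out of the accumulator
theorem foldl_add_cons (s : List String) (h : String) (acc : List String) (hh : h ∉ s) :
    s.foldl PySem.Set.add (h :: acc) = h :: s.foldl PySem.Set.add acc := by
  induction s generalizing acc with
  | nil => rfl
  | cons x s ih =>
      have hxh : x ≠ h := fun e => hh (by simp [e])
      rw [List.foldl_cons, List.foldl_cons,
        show PySem.Set.add (h :: acc) x = h :: PySem.Set.add acc x by
          simp [PySem.Set.add, hxh]; split <;> simp]
      exact ih _ (fun m => hh (List.mem_cons_of_mem _ m))

-- B's loop prepends its accumulated result
theorem bNubLoop_append (items : List String) (res : List String) :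
    bNubLoop res items = res ++ bNubLoop [] items := by
  match items with
  | [] => simp [bNubLoop]
  | head :: rest =>
      rw [bNubLoop, bNubLoop,
        bNubLoop_append (rest.filter (fun x => x ≠ head)) (res ++ [head]),
        bNubLoop_append (rest.filter (fun x => x ≠ head)) ([] ++ [head])]
      simp
termination_by items.length
decreasing_by all_goals exact Nat.lt_succ_of_le (List.length_filter_le _ _)

-- MAIN: folding Set.add (A's dedup) = B's nub
theorem ofList_eq_bNub (cs : List String) :
    cs.foldl PySem.Set.add [] = bNubLoop [] cs := by
  match cs with
  | [] => simp [bNubLoop]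
  | head :: rest =>
      rw [List.foldl_cons, show PySem.Set.add [] head = [head] from rfl,
        foldl_add_filter rest [head] head (by simp),
        foldl_add_cons _ _ _ (by simp),
        ofList_eq_bNub (rest.filter (fun y => y ≠ head))]
      rw [bNubLoop]
      rw [bNubLoop_append (rest.filter (fun x => x ≠ head)) ([] ++ [head])]
      simp
termination_by cs.length
decreasing_by exact Nat.lt_succ_of_le (List.length_filter_le _ _)

-- ===== VERDICT =====
theorem collect_key_terms_spec : Claim_equal_collect_key_terms := by
  intro se _
  show collect_key_terms se = collect_key_terms_alt se
  unfold collect_key_terms collect_key_terms_alt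
  rw [outer_fold_eq, ofList_eq_bNub,
    show ((24 : Int) = ((24 : Nat) : Int)) from rfl, PySem.List.slice_to_natCast]
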